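-- pv_equiv track=rewrite | github.com/empirehazeclaw/empirehazeclaw | backups/integration_backup_20260416_185449/scripts_20260416_185449/kg_updater.py | enforce_limit
-- ===== SOURCE A (Python) =====
-- from typing import Dict, List, Tuple
--
-- MAX_ENTITIES = 500
--
-- def enforce_limit(kg: Dict) -> Tuple[Dict, int]:
--     """Enforce max entities limit by removing lowest priority stale entities."""
--     entities = kg.get("entities", {})
--     removed_count = 0
--
--     if len(entities) <= MAX_ENTITIES:
--         return kg, 0
--
--     # Find stale entities to remove
--     stale = [(eid, edata) for eid, edata in entities.items() if edata.get("status") == "stale"]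
--     stale.sort(key=lambda x: x[1].get("priority", "LOW"))
--
--     while len(entities) > MAX_ENTITIES and stale:
--         eid, _ = stale.pop(0)
--         del entities[eid]
--         removed_count += 1
--
--     kg["entities"] = entities
--     return kg, removed_count
-- ===== SOURCE B (Python) =====
-- MAX_ENTITIES = 500
--
-- def enforce_limit(kg):
--     """Enforce max entities limit: bucket stale ids by priority, remove the
--     lowest-priority ones by rebuilding the entities dict in one filter pass.
--     (Return-value equivalent to the original; A mutates the inner entities
--     dict in place, B rebuilds it.)"""
--     entities = kg.get("entities", {})
--     if len(entities) <= MAX_ENTITIES: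
--         return kg, 0
--
--     buckets = {}
--     for eid, edata in entities.items():
--         if edata.get("status") == "stale":
--             prio = edata.get("priority", "LOW")
--             buckets[prio] = buckets.get(prio, []) + [eid]
--
--     need = len(entities) - MAX_ENTITIES
--     doomed = []
--     for prio in sorted(buckets):
--         if len(doomed) >= need:
--             break
--         doomed.extend(buckets[prio][:need - len(doomed)])
--
--     doomed_set = set(doomed)
--     kg["entities"] = {eid: edata for eid, edata in entities.items()
--                       if eid not in doomed_set}
--     return kg, len(doomed)
-- ===== Notes on version B (the rewrite author's own statement) =====
-- stated objective: alternative
-- what changed: Instead of sorting all stale entries and deleting them one at a time with repeated list.pop(0) on the sorted list, B buckets stale ids by priority in one pass, walks the sorted priority keys to collect the ids to drop, and rebuilds the entities dict with a single filter pass.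
import Mathlib
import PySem

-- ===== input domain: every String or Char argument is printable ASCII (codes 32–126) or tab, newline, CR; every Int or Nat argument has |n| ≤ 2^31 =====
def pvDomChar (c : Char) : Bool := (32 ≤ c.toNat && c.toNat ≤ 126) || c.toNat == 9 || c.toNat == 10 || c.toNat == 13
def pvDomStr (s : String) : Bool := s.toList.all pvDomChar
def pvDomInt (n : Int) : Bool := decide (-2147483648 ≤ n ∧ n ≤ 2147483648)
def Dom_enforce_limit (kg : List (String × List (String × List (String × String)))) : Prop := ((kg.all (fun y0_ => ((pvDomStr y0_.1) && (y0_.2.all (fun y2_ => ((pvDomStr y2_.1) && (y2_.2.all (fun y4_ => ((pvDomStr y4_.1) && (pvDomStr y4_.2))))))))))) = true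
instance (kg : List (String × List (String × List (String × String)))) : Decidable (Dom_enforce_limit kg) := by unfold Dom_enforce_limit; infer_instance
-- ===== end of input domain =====

-- B buckets the stale entity ids by priority and rebuilds the entities dict in one
-- filter pass instead of sorting all stale entries and deleting them one by one.
-- Return-value equivalence: the Python A mutates the inner entities dict in place,
-- B rebuilds it; the returned (kg, count) pair is the same.

-- ===== PORT A =====
-- while len(entities) > MAX_ENTITIES and stale: eid, _ = stale.pop(0); del entities[eid]; removed_count += 1
def pvLoopA (ents : PySem.Dict String (List (String × String)))
    (stale : List (String × List (String × String))) (removed : Int) :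
    PySem.Dict String (List (String × String)) × Int :=
  match stale with
  | [] => (ents, removed)
  | (eid, _) :: rest =>
    if 500 < ents.size then pvLoopA (ents.erase eid) rest (removed + 1)
    else (ents, removed)

def enforce_limit (kg : List (String × List (String × List (String × String)))) : (List (String × List (String × List (String × String)))) × Int :=
  let entities := PySem.Dict.mk ((PySem.Dict.mk kg).getD "entities" [])
  if entities.size ≤ 500 then (kg, 0)
  else
    let stale := entities.items.filter (fun p => (PySem.Dict.mk p.2).get? "status" == some "stale")
    let staleS := PySem.List.sorted stale (fun p => (PySem.Dict.mk p.2).getD "priority" "LOW") false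
    let r := pvLoopA entities staleS 0
    (((PySem.Dict.mk kg).insert "entities" r.1.items).items, r.2)

-- ===== PORT B =====
def enforce_limit_alt (kg : List (String × List (String × List (String × String)))) : (List (String × List (String × List (String × String)))) × Int :=
  let entities := PySem.Dict.mk ((PySem.Dict.mk kg).getD "entities" [])
  if entities.size ≤ 500 then (kg, 0)
  else
    -- one pass: buckets[prio] = buckets.get(prio, []) + [eid] for stale entities
    let buckets := entities.items.foldl
      (fun (b : PySem.Dict String (List String)) p =>
        if (PySem.Dict.mk p.2).get? "status" == some "stale" then
          b.insert ((PySem.Dict.mk p.2).getD "priority" "LOW")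
            (b.getD ((PySem.Dict.mk p.2).getD "priority" "LOW") [] ++ [p.1])
        else b) PySem.Dict.empty
    let need := entities.size - 500
    -- for prio in sorted(buckets): collect ids until 'need' are found
    let doomed := (PySem.List.sorted buckets.keys (fun k => k) false).foldl
      (fun (d : List String) prio =>
        if need ≤ d.length then d
        else d ++ (buckets.getD prio []).take (need - d.length)) []
    -- kg["entities"] = {eid: edata for eid, edata in entities.items() if eid not in doomed_set}
    let ents2 := entities.items.filter (fun p => !(doomed.contains p.1))
    (((PySem.Dict.mk kg).insert "entities" ents2).items, (doomed.length : Int))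

-- ===== PRECONDITION & SPEC =====
-- Pre_ excludes only association lists that both exceed the 500-entity limit and carry
-- a duplicate entity id: such a list does not represent a Python dict (A's input type),
-- so A's per-id deletion/count behaviour on it is not defined; at or below the limit
-- every input is admitted (both programs return (kg, 0) there).
def Pre_enforce_limit (kg : List (String × List (String × List (String × String)))) : Prop :=
  ((PySem.Dict.mk kg).getD "entities" []).length ≤ 500 ∨
    (((PySem.Dict.mk kg).getD "entities" []).map Prod.fst).Nodup
instance (kg : List (String × List (String × List (String × String)))) : Decidable (Pre_enforce_limit kg) := by unfold Pre_enforce_limit; infer_instance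

def pvWitness_enforce_limit : (List (String × List (String × List (String × String)))) := []

def Spec_enforce_limit (kg : List (String × List (String × List (String × String)))) (out : (List (String × List (String × List (String × String)))) × Int) : Prop := out = enforce_limit_alt kg
instance (kg : List (String × List (String × List (String × String)))) (out : (List (String × List (String × List (String × String)))) × Int) : Decidable (Spec_enforce_limit kg out) := by
  unfold Spec_enforce_limit
  have d1 : DecidableEq (List (String × List (String × List (String × String)))) :=
    fun a b => List.hasDecEq a b
  exact @instDecidableEqProd _ _ d1 (inferInstance) out (enforce_limit_alt kg)

-- ===== CLAIM (what is proved, stated in full; the proofs are below) =====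
def Claim_equal_enforce_limit : Prop := ∀ (kg : List (String × List (String × List (String × String)))), Dom_enforce_limit kg → Pre_enforce_limit kg → Spec_enforce_limit kg (enforce_limit kg)

-- ===== LEMMAS AND PROOFS =====

-- one unfolding step of insertBy
theorem pv_insertBy_cons {α : Type} (bef : α → α → Bool) (x y : α) (ys : List α) :
    PySem.List.insertBy bef x (y :: ys) =
      if bef x y then x :: y :: ys else y :: PySem.List.insertBy bef x ys := by
  simp [PySem.List.insertBy]

-- insertBy passes over a prefix it does not go before
theorem pv_insertBy_append_not_before {α : Type} (bef : α → α → Bool) (x : α)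
    (pre suf : List α) (h : ∀ a ∈ pre, bef x a = false) :
    PySem.List.insertBy bef x (pre ++ suf) = pre ++ PySem.List.insertBy bef x suf := by
  induction pre with
  | nil => simp
  | cons a pre ih =>
    have ha := h a (by simp)
    rw [List.cons_append, pv_insertBy_cons, if_neg (by simp [ha]),
      ih (fun a ha' => h a (by simp [ha']))]
    rfl

-- insertBy drops in front of a suffix it goes before everywhere
theorem pv_insertBy_all_before {α : Type} (bef : α → α → Bool) (x : α)
    (suf : List α) (h : ∀ a ∈ suf, bef x a = true) :
    PySem.List.insertBy bef x suf = x :: suf := by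
  cases suf with
  | nil => rfl
  | cons a suf => rw [pv_insertBy_cons, if_pos (by simp [h a (by simp)])]

-- sorted over a snoc is an insertBy into the sorted prefix
theorem pv_sorted_snoc {α : Type} (m : List α) (y : α) (ky : α → String) :
    PySem.List.sorted (m ++ [y]) ky false =
      PySem.List.insertBy (fun a b => decide (ky a < ky b)) y (PySem.List.sorted m ky false) := by
  rw [PySem.List.sorted_eq_foldl_insertBy, PySem.List.sorted_eq_foldl_insertBy,
    List.foldl_append]
  rfl

-- a strictly increasing key list splits around a member
theorem pv_pairwise_lt_mem_split (ks : List String) (h : ks.Pairwise (· < ·))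
    (k : String) (hk : k ∈ ks) :
    ∃ A B, ks = A ++ k :: B ∧ (∀ a ∈ A, a < k) ∧ (∀ b ∈ B, k < b) := by
  obtain ⟨A, B, rfl⟩ := List.append_of_mem hk
  refine ⟨A, B, rfl, ?_, ?_⟩
  · intro a ha
    exact (List.pairwise_append.1 h).2.2 a ha k (by simp)
  · exact (List.pairwise_cons.1 (List.pairwise_append.1 h).2.1).1

-- inserting a fresh key into a strictly increasing key list
theorem pv_insertBy_fresh_split (ks : List String) (h : ks.Pairwise (· < ·))
    (k : String) (hk : k ∉ ks) :
    ∃ A B, ks = A ++ B ∧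
      PySem.List.insertBy (fun a b => decide ((fun s => s) a < (fun s => s) b)) k ks = A ++ k :: B ∧
      (∀ a ∈ A, a < k) ∧ (∀ b ∈ B, k < b) := by
  induction ks with
  | nil => exact ⟨[], [], rfl, rfl, by simp, by simp⟩
  | cons y ys ih =>
    by_cases hky : k < y
    · refine ⟨[], y :: ys, rfl, ?_, by simp, ?_⟩
      · rw [pv_insertBy_cons, if_pos (by simpa using hky)]; rfl
      · intro b hb
        rcases List.mem_cons.1 hb with rfl | hb
        · exact hky
        · exact lt_trans hky ((List.pairwise_cons.1 h).1 b hb)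
    · have hne : y ≠ k := fun e => hk (by simp [e])
      have hyk : y < k := lt_of_le_of_ne (not_lt.1 hky) hne
      obtain ⟨A, B, hAB, hins, hA, hB⟩ :=
        ih (List.pairwise_cons.1 h).2 (fun m => hk (by simp [m]))
      refine ⟨y :: A, B, by simp [hAB], ?_, ?_, hB⟩
      · rw [pv_insertBy_cons, if_neg (by simpa using hky), hins]
        rfl
      · intro a ha
        rcases List.mem_cons.1 ha with rfl | ha
        · exact hyk
        · exact hA a ha

-- the key of an element of a key bucket
theorem pv_mem_filter_key {α : Type} (l : List α) (key : α → String) (k : String)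
    (a : α) (ha : a ∈ l.filter (fun x => key x == k)) : key a = k := by
  simpa using (List.mem_filter.1 ha).2

-- singleton filter
theorem pv_filter_singleton {α : Type} (x : α) (p : α → Bool) :
    [x].filter p = if p x then [x] else [] := by
  cases h : p x <;> simp [h]

-- THE SORT LEMMA: a stable sort by a string key is the concatenation, over the
-- sorted distinct keys, of the key buckets in original order.
theorem pv_sorted_key_eq_flatMap {α : Type} (l : List α) (key : α → String) :
    PySem.List.sorted l key false =
      (PySem.List.sorted (PySem.Set.ofList (l.map key)) (fun k => k) false).flatMap
        (fun k => l.filter (fun x => key x == k)) := by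
  induction l using List.reverseRecOn with
  | nil => rfl
  | append_singleton l x ih =>
    rw [pv_sorted_snoc, ih]
    have hof : PySem.Set.ofList ((l ++ [x]).map key)
        = PySem.Set.add (PySem.Set.ofList (l.map key)) (key x) := by
      rw [List.map_append, PySem.Set.ofList_append]
      rfl
    rw [hof]
    have hpw : (PySem.List.sorted (PySem.Set.ofList (l.map key)) (fun k => k) false).Pairwise (· < ·) :=
      PySem.List.sorted_ofList_pairwise_lt (l.map key)
    by_cases hmem : key x ∈ PySem.Set.ofList (l.map key)
    · -- existing priority: key list unchanged, x appended to its bucket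
      have hadd : PySem.Set.add (PySem.Set.ofList (l.map key)) (key x)
          = PySem.Set.ofList (l.map key) := by
        simp [PySem.Set.add, hmem]
      rw [hadd]
      have hkx : key x ∈ PySem.List.sorted (PySem.Set.ofList (l.map key)) (fun k => k) false := by
        rw [PySem.List.mem_sorted]; exact hmem
      obtain ⟨A, B, hsplit, hA, hB⟩ :=
        pv_pairwise_lt_mem_split _ hpw (key x) hkx
      rw [hsplit]
      simp only [List.flatMap_append, List.flatMap_cons, List.filter_append]
      have hbA : (A.flatMap fun k => l.filter (fun a => key a == k) ++ [x].filter (fun a => key a == k))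
          = A.flatMap (fun k => l.filter (fun a => key a == k)) := by
        refine List.flatMap_congr (fun k hk => ?_)
        rw [pv_filter_singleton, if_neg (by simp [(hA k hk).ne']), List.append_nil]
      have hbB : (B.flatMap fun k => l.filter (fun a => key a == k) ++ [x].filter (fun a => key a == k))
          = B.flatMap (fun k => l.filter (fun a => key a == k)) := by
        refine List.flatMap_congr (fun k hk => ?_)
        rw [pv_filter_singleton, if_neg (by simp [(hB k hk).ne]), List.append_nil]
      have hbx : l.filter (fun a => key a == key x) ++ [x].filter (fun a => key a == key x)
          = l.filter (fun a => key a == key x) ++ [x] := by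
        rw [pv_filter_singleton, if_pos (by simp)]
      rw [hbA, hbB, hbx, ← List.append_assoc,
        pv_insertBy_append_not_before _ x
          (A.flatMap (fun k => l.filter (fun a => key a == k)) ++ l.filter (fun a => key a == key x)) _
          (by
            intro a ha
            rcases List.mem_append.1 ha with ha | ha
            · obtain ⟨k, hkA, hak⟩ := List.mem_flatMap.1 ha
              have := pv_mem_filter_key l key k a hak
              exact decide_eq_false (by rw [this]; exact not_lt.2 (hA k hkA).le)
            · have := pv_mem_filter_key l key (key x) a ha
              exact decide_eq_false (by rw [this]; exact lt_irrefl _)),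
        pv_insertBy_all_before _ x _
          (by
            intro a ha
            obtain ⟨k, hkB, hak⟩ := List.mem_flatMap.1 ha
            have := pv_mem_filter_key l key k a hak
            exact decide_eq_true (by rw [this]; exact hB k hkB))]
      simp
    · -- fresh priority: key inserted into the key list, bucket is [x]
      have hadd : PySem.Set.add (PySem.Set.ofList (l.map key)) (key x)
          = PySem.Set.ofList (l.map key) ++ [key x] := by
        simp [PySem.Set.add, hmem]
      rw [hadd, pv_sorted_snoc]
      have hkx : key x ∉ PySem.List.sorted (PySem.Set.ofList (l.map key)) (fun k => k) false := by
        rw [PySem.List.mem_sorted]; exact hmem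
      obtain ⟨A, B, hAB, hins, hA, hB⟩ :=
        pv_insertBy_fresh_split _ hpw (key x) hkx
      rw [hins, hAB]
      simp only [List.flatMap_append, List.flatMap_cons, List.filter_append]
      have hbA : (A.flatMap fun k => l.filter (fun a => key a == k) ++ [x].filter (fun a => key a == k))
          = A.flatMap (fun k => l.filter (fun a => key a == k)) := by
        refine List.flatMap_congr (fun k hk => ?_)
        rw [pv_filter_singleton, if_neg (by simp [(hA k hk).ne']), List.append_nil]
      have hbB : (B.flatMap fun k => l.filter (fun a => key a == k) ++ [x].filter (fun a => key a == k))
          = B.flatMap (fun k => l.filter (fun a => key a == k)) := by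
        refine List.flatMap_congr (fun k hk => ?_)
        rw [pv_filter_singleton, if_neg (by simp [(hB k hk).ne]), List.append_nil]
      have hbx : l.filter (fun a => key a == key x) ++ [x].filter (fun a => key a == key x) = [x] := by
        have hnil : l.filter (fun a => key a == key x) = [] := by
          refine List.filter_eq_nil_iff.2 (fun a ha => ?_)
          simp only [beq_iff_eq]
          intro he
          exact hmem (by rw [← he]; exact (PySem.Set.mem_ofList _ _).2 (List.mem_map_of_mem ha))
        rw [hnil, pv_filter_singleton, if_pos (by simp)]
        rfl
      rw [hbA, hbB, hbx,
        pv_insertBy_append_not_before _ x (A.flatMap (fun k => l.filter (fun a => key a == k))) _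
          (by
            intro a ha
            obtain ⟨k, hkA, hak⟩ := List.mem_flatMap.1 ha
            have := pv_mem_filter_key l key k a hak
            exact decide_eq_false (by rw [this]; exact not_lt.2 (hA k hkA).le)),
        pv_insertBy_all_before _ x _
          (by
            intro a ha
            obtain ⟨k, hkB, hak⟩ := List.mem_flatMap.1 ha
            have := pv_mem_filter_key l key k a hak
            exact decide_eq_true (by rw [this]; exact hB k hkB))]
      simp

-- fold collecting bucket prefixes until 'need' ids = take of the concatenation
theorem pv_foldl_take_buckets (B : String → List String) (need : Nat) :
    ∀ (ks : List String) (acc : List String), acc.length ≤ need →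
      ks.foldl (fun d prio => if need ≤ d.length then d
        else d ++ (B prio).take (need - d.length)) acc
      = acc ++ ((ks.flatMap B).take (need - acc.length)) := by
  intro ks
  induction ks with
  | nil => intro acc _; simp
  | cons k ks ih =>
    intro acc hacc
    by_cases hfull : need ≤ acc.length
    · have hlen : acc.length = need := le_antisymm hacc hfull
      simp only [List.foldl_cons, if_pos hfull]
      rw [ih acc hacc]
      simp [hlen]
    · simp only [List.foldl_cons, if_neg hfull]
      rw [ih (acc ++ (B k).take (need - acc.length)) (by simp [List.length_take]; omega)]
      rw [List.flatMap_cons, List.take_append]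
      simp only [List.append_assoc]
      congr 2
      congr 1
      simp [List.length_append, List.length_take]
      omega

-- a fold of dict erases is one filter over the items
theorem pv_foldl_erase_eq_filter (D : List String) :
    ∀ (d : PySem.Dict String (List (String × String))),
      D.foldl (fun d k => d.erase k) d
        = PySem.Dict.mk (d.items.filter (fun p => !(D.contains p.1))) := by
  induction D with
  | nil => intro d; simp
  | cons k D ih =>
    intro d
    simp only [List.foldl_cons]
    rw [ih]
    have he : (PySem.Dict.erase d k).items = d.items.filter (fun p => !(p.1 == k)) := rfl
    rw [he, List.filter_filter]
    congr 1
    apply List.filter_congr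
    intro p _
    by_cases h1 : p.1 = k <;> by_cases h2 : p.1 ∈ D <;> simp [h1, h2]

-- a nodup key list keeps exactly one occurrence out
theorem pv_length_filter_ne (l : List String) (eid : String)
    (h : l.Nodup) (hm : eid ∈ l) :
    (l.filter (fun k => !(k == eid))).length = l.length - 1 := by
  rw [← List.countP_eq_length_filter]
  have h1 : l.count eid = 1 := List.count_eq_one_of_mem h hm
  have h2 := List.length_eq_countP_add_countP (p := fun k => (k == eid)) (l := l)
  have h3 : l.count eid = l.countP (fun k => (k == eid)) := rfl
  have h4 : l.countP (fun k => !(k == eid)) = l.countP (fun k => ¬ ((k == eid) = true)) := by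
    apply List.countP_congr
    intro a _
    simp
  rw [h4] at *
  omega

-- filter on pairs commutes with the fst projection
theorem pv_map_fst_filter {β : Type} (l : List (String × β)) (p : String → Bool) :
    (l.filter (fun q => p q.1)).map Prod.fst = (l.map Prod.fst).filter p := by
  induction l with
  | nil => rfl
  | cons a l ih => by_cases h : p a.1 <;> simp [h, ih]

-- characterization of A's removal loop
set_option maxRecDepth 4096 in
theorem pv_loopA_spec :
    ∀ (stale : List (String × List (String × String)))
      (ents : PySem.Dict String (List (String × String))) (r : Int),
      ents.keys.Nodup → (stale.map Prod.fst).Nodup →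
      (∀ p ∈ stale, p.1 ∈ ents.keys) →
      pvLoopA ents stale r =
        (((stale.take (ents.size - 500)).map Prod.fst).foldl (fun d k => d.erase k) ents,
          r + ((min (ents.size - 500) stale.length : Nat) : Int)) := by
  intro stale
  induction stale with
  | nil => intro ents r _ _ _; simp [pvLoopA]
  | cons p rest ih =>
    intro ents r hkeys hnd hmem
    rcases p with ⟨eid, dd⟩
    by_cases hgt : 500 < ents.size
    · rw [pvLoopA, if_pos hgt]
      have hin : eid ∈ ents.keys := hmem (eid, dd) (by simp)
      have hker : (ents.erase eid).keys = ents.keys.filter (fun k => !(k == eid)) := by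
        show ((ents.items.filter (fun q => !(q.1 == eid))).map Prod.fst) = _
        exact pv_map_fst_filter ents.items (fun k => !(k == eid))
      have hsz : (ents.erase eid).size = ents.size - 1 := by
        show (ents.items.filter (fun q => !(q.1 == eid))).length = ents.items.length - 1
        have : (ents.items.filter (fun q => !(q.1 == eid))).length
            = ((ents.items.filter (fun q => !(q.1 == eid))).map Prod.fst).length := by
          simp
        rw [this, pv_map_fst_filter ents.items (fun k => !(k == eid))]
        have := pv_length_filter_ne (ents.items.map Prod.fst) eid hkeys hin
        simpa using this
      have hnd' : (rest.map Prod.fst).Nodup := (List.nodup_cons.1 hnd).2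
      have hnotin : eid ∉ rest.map Prod.fst := by
        simpa using (List.nodup_cons.1 hnd).1
      have hmem' : ∀ q ∈ rest, q.1 ∈ (ents.erase eid).keys := by
        intro q hq
        rw [hker]
        refine List.mem_filter.2 ⟨hmem q (by simp [hq]), ?_⟩
        have : q.1 ≠ eid := fun e => hnotin (e ▸ List.mem_map_of_mem hq)
        simp [this]
      have hkeys' : (ents.erase eid).keys.Nodup := by
        rw [hker]; exact hkeys.filter _
      rw [ih (ents.erase eid) (r + 1) hkeys' hnd' hmem', hsz]
      have harith : ents.size - 1 - 500 = ents.size - 500 - 1 := by omega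
      have htake : ((eid, dd) :: rest).take (ents.size - 500)
          = (eid, dd) :: rest.take (ents.size - 500 - 1) := by
        have : ∃ m, ents.size - 500 = m + 1 := ⟨ents.size - 501, by omega⟩
        obtain ⟨m, hm⟩ := this
        rw [hm]
        simp [List.take_succ_cons]
      rw [harith, htake]
      simp only [List.map_cons, List.foldl_cons]
      refine Prod.ext ?_ ?_
      · rfl
      · show r + 1 + ((min (ents.size - 500 - 1) rest.length : Nat) : Int)
            = r + ((min (ents.size - 500) (rest.length + 1) : Nat) : Int)
        omega
    · rw [pvLoopA, if_neg hgt]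
      have h0 : ents.size - 500 = 0 := by omega
      simp [h0]

-- the two ports compute the same pair
set_option maxRecDepth 65536 in
theorem pv_main (kg : List (String × List (String × List (String × String))))
    (hpre : Pre_enforce_limit kg) : enforce_limit kg = enforce_limit_alt kg := by
  unfold enforce_limit enforce_limit_alt
  by_cases hsz : (PySem.Dict.mk ((PySem.Dict.mk kg).getD "entities" [])).size ≤ 500
  · simp only [if_pos hsz]
  · simp only [if_neg hsz]
    set E : List (String × List (String × String)) := (PySem.Dict.mk kg).getD "entities" [] with hE
    have hnd : (E.map Prod.fst).Nodup := by
      rcases hpre with h | h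
      · exact absurd h hsz
      · exact h
    set stale : List (String × List (String × String)) :=
      E.filter (fun p => (PySem.Dict.mk p.2).get? "status" == some "stale") with hstale
    set staleS := PySem.List.sorted stale
      (fun p => (PySem.Dict.mk p.2).getD "priority" "LOW") false with hstaleS
    -- A side: the loop erases the first (size-500) sorted stale ids
    have hstnd : (stale.map Prod.fst).Nodup := by
      rw [hstale]
      exact hnd.sublist (List.Sublist.map Prod.fst List.filter_sublist)
    have hsnd : (staleS.map Prod.fst).Nodup := by
      have hperm : staleS.Perm stale :=
        PySem.List.sorted_perm stale (fun p => (PySem.Dict.mk p.2).getD "priority" "LOW") false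
      exact ((hperm.map Prod.fst).nodup_iff).2 hstnd
    have hsmem : ∀ p ∈ staleS, p.1 ∈ (PySem.Dict.mk E).keys := by
      intro p hp
      have : p ∈ stale := (PySem.List.mem_sorted _ _ _ _).1 hp
      show p.1 ∈ E.map Prod.fst
      exact List.mem_map_of_mem (List.mem_of_mem_filter (hstale ▸ this))
    have hA := pv_loopA_spec staleS (PySem.Dict.mk E) 0 hnd hsnd hsmem
    -- B side: canonicalize the bucket fold
    have hbuckets : E.foldl (fun (b : PySem.Dict String (List String)) p =>
          if (PySem.Dict.mk p.2).get? "status" == some "stale" then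
            b.insert ((PySem.Dict.mk p.2).getD "priority" "LOW")
              (b.getD ((PySem.Dict.mk p.2).getD "priority" "LOW") [] ++ [p.1])
          else b) PySem.Dict.empty
        = (stale.map (fun p => ((PySem.Dict.mk p.2).getD "priority" "LOW", p.1))).foldl
            (fun b q => b.modify q.1 [] (· ++ [q.2])) PySem.Dict.empty := by
      rw [List.foldl_map, hstale, List.foldl_filter]
      rfl
    have hgetD : ∀ k, ((stale.map (fun p => ((PySem.Dict.mk p.2).getD "priority" "LOW", p.1))).foldl
          (fun b q => b.modify q.1 [] (· ++ [q.2])) PySem.Dict.empty).getD k []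
        = (stale.filter (fun p => (PySem.Dict.mk p.2).getD "priority" "LOW" == k)).map Prod.fst := by
      intro k
      rw [PySem.Dict.getD_foldl_modify_append, List.filter_map, List.map_map]
      simp only [PySem.Dict.getD_empty, List.nil_append]
      rfl
    have hkeys2 : ((stale.map (fun p => ((PySem.Dict.mk p.2).getD "priority" "LOW", p.1))).foldl
          (fun b q => b.modify q.1 [] (· ++ [q.2])) PySem.Dict.empty).keys
        = PySem.Set.ofList (stale.map (fun p => (PySem.Dict.mk p.2).getD "priority" "LOW")) := by
      rw [PySem.Dict.keys_foldl_modify_key, List.map_map]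
      rfl
    -- B side: the collected ids are the first (size-500) sorted stale ids
    have hdoom : ((PySem.List.sorted (E.foldl (fun (b : PySem.Dict String (List String)) p =>
            if (PySem.Dict.mk p.2).get? "status" == some "stale" then
              b.insert ((PySem.Dict.mk p.2).getD "priority" "LOW")
                (b.getD ((PySem.Dict.mk p.2).getD "priority" "LOW") [] ++ [p.1])
            else b) PySem.Dict.empty).keys (fun k => k) false).foldl
          (fun (d : List String) prio =>
            if (PySem.Dict.mk E).size - 500 ≤ d.length then d
            else d ++ ((E.foldl (fun (b : PySem.Dict String (List String)) p =>
              if (PySem.Dict.mk p.2).get? "status" == some "stale" then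
                b.insert ((PySem.Dict.mk p.2).getD "priority" "LOW")
                  (b.getD ((PySem.Dict.mk p.2).getD "priority" "LOW") [] ++ [p.1])
              else b) PySem.Dict.empty).getD prio []).take ((PySem.Dict.mk E).size - 500 - d.length)) [])
        = (staleS.take ((PySem.Dict.mk E).size - 500)).map Prod.fst := by
      rw [hbuckets, hkeys2]
      rw [pv_foldl_take_buckets
        (fun k2 => ((stale.map (fun p => ((PySem.Dict.mk p.2).getD "priority" "LOW", p.1))).foldl
          (fun b q => b.modify q.1 [] (· ++ [q.2])) PySem.Dict.empty).getD k2 [])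
        ((PySem.Dict.mk E).size - 500) _ [] (by simp)]
      simp only [List.nil_append]
      rw [List.flatMap_congr (fun k _ => hgetD k), ← List.map_flatMap,
        ← pv_sorted_key_eq_flatMap stale (fun p => (PySem.Dict.mk p.2).getD "priority" "LOW"),
        List.map_take]
      rfl
    rw [hdoom, hA, pv_foldl_erase_eq_filter]
    refine Prod.ext ?_ ?_
    · rfl
    · show (0 : Int) + ((min ((PySem.Dict.mk E).size - 500) staleS.length : Nat) : Int)
          = (((staleS.take ((PySem.Dict.mk E).size - 500)).map Prod.fst).length : Int)
      simp [List.length_map, List.length_take]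

-- ===== VERDICT (by name: the statement is the Claim_ definition above) =====
theorem enforce_limit_spec : Claim_equal_enforce_limit := by
  intro kg _ hpre
  unfold Spec_enforce_limit
  exact pv_main kg hpre
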